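-- pv_equiv track=rewrite | github.com/adiens916/NOTE-algorithm | problems/Baekjoon_Online_Judge/Step_by_step/10_Brute_force/18111_마인크래프트.py | brute_force_for_min_work_time
-- ===== SOURCE A (Python) =====
-- def brute_force_for_min_work_time(lands, B):
--     MAX_HEIGHT = 256
--
--     work_times = [0] * (MAX_HEIGHT + 1)
--     for height in range(MAX_HEIGHT + 1):
--         work_time = dig_then_put_for_height_with_blocks(lands, height, B)
--         work_times[height] = work_time
--
--     min_work_time = min(work_times)
--     heights = []
--     for height in range(MAX_HEIGHT + 1):
--         if min_work_time == work_times[height]: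
--             heights.append(height)
--
--     return min_work_time, heights[-1]
--
-- def dig_then_put_for_height_with_blocks(lands, flat, B) -> int:
--     # NOTE: MAX 값을 잘못 설정하니까 틀렸었음.
--     MAX_WORK_TIME = 500 * 500 * 256 * 2
--     work_time = 0
--
--     for line in lands:
--         for block in line:
--             if block >= flat:
--                 diff = block - flat
--                 # dig
--                 B += diff
--                 work_time += diff * 2
--
--             elif block < flat:
--                 diff = flat - block
--                 # put
--                 B -= diff
--                 work_time += diff
--
--     if B < 0:
--         return MAX_WORK_TIME
--     else:
--         return work_time
-- ===== SOURCE B (Python) =====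
-- def brute_force_for_min_work_time(lands, B):
--     # One sweep over the grid builds a value->count histogram plus total sum and
--     # block count; each candidate height is then costed from the distinct values
--     # only, and the best (lowest time, tallest on ties) is kept in the same pass.
--     MAX_WORK_TIME = 500 * 500 * 256 * 2
--     counts = {}
--     total = 0
--     n = 0
--     for line in lands:
--         for block in line:
--             counts[block] = counts.get(block, 0) + 1
--             total += block
--             n += 1
--     best_time = None
--     best_height = 0
--     for height in range(257):
--         if B + total - n * height < 0:
--             work = MAX_WORK_TIME
--         else:
--             work = 0
--             for value, count in counts.items():
--                 if value >= height:
--                     work += 2 * count * (value - height)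
--                 else:
--                     work += count * (height - value)
--         if best_time is None or work <= best_time:
--             best_time = work
--             best_height = height
--     return best_time, best_height
-- ===== Notes on version B (the rewrite author's own statement) =====
-- stated objective: faster
-- what changed: Instead of rescanning the whole grid for each of the 257 candidate heights, B scans the grid once to build a value->count histogram plus the total sum and block count, costs each height from the distinct values only (skipping the scan entirely when the block balance B+total-n*h is negative), and picks the minimum-time/tallest height in the same pass instead of min()+collect+[-1].
import Mathlib
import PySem

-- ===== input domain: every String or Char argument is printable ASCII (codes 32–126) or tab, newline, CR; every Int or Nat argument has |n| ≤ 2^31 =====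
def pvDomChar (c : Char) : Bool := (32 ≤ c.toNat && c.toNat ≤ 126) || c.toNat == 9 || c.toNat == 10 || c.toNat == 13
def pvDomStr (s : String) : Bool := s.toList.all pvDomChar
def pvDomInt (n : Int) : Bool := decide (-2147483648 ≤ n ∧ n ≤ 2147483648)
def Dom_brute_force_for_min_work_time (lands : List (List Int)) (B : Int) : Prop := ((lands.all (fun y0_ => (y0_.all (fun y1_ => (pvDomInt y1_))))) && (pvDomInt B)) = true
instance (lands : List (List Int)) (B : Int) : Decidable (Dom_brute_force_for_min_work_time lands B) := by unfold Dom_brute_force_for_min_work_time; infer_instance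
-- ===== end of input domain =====

-- B replaces A's 257 full-grid scans by one scan building a value→count histogram
-- (plus total sum and block count), costs each height from the distinct values only,
-- and selects the best height in the same pass (faster in a timing run's label).

-- ===== PORT A =====
def dig_then_put_for_height_with_blocks (lands : List (List Int)) (flat : Int) (B : Int) : Int :=
  let MAX_WORK_TIME : Int := 500 * 500 * 256 * 2
  -- state (B, work_time), updated per block exactly as the Python loop does
  let st := lands.foldl (fun st line =>
      line.foldl (fun st block =>
        if block ≥ flat then (st.1 + (block - flat), st.2 + (block - flat) * 2)
        else if block < flat then (st.1 - (flat - block), st.2 + (flat - block))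
        else st) st) (B, (0 : Int))
  if st.1 < 0 then MAX_WORK_TIME else st.2

def brute_force_for_min_work_time (lands : List (List Int)) (B : Int) : Int × Int :=
  let MAX_HEIGHT : Int := 256
  let work_times0 : List Int := List.replicate (MAX_HEIGHT + 1).toNat 0
  let work_times := (PySem.List.pyRange 0 (MAX_HEIGHT + 1)).foldl
      (fun wt height => PySem.List.pySetD wt height (dig_then_put_for_height_with_blocks lands height B)) work_times0
  -- min() of the (always 257-long) list; the .getD 0 defaults are never reached
  let min_work_time := (PySem.List.min? work_times (fun x => x)).getD 0
  let heights := (PySem.List.pyRange 0 (MAX_HEIGHT + 1)).foldl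
      (fun acc height => if min_work_time = PySem.List.pyGetD work_times height 0 then acc ++ [height] else acc) ([] : List Int)
  (min_work_time, (PySem.List.pyGet? heights (-1)).getD 0)

-- ===== PORT B =====
-- one sweep over the grid: histogram of block values, their sum, their count
def pvAltScan (lands : List (List Int)) : PySem.Dict Int Int × Int × Int :=
  lands.foldl (fun st line =>
    line.foldl (fun st block =>
      (st.1.insert block (st.1.getD block 0 + 1), st.2.1 + block, st.2.2 + 1)) st)
    (PySem.Dict.empty, 0, 0)

def brute_force_for_min_work_time_alt (lands : List (List Int)) (B : Int) : Int × Int :=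
  let MAX_WORK_TIME : Int := 500 * 500 * 256 * 2
  let s := pvAltScan lands
  let sel := (PySem.List.pyRange 0 257).foldl (fun (st : Option Int × Int) height =>
      let work : Int :=
        if B + s.2.1 - s.2.2 * height < 0 then MAX_WORK_TIME
        else s.1.items.foldl (fun w vc =>
          if vc.1 ≥ height then w + 2 * vc.2 * (vc.1 - height) else w + vc.2 * (height - vc.1)) 0
      match st.1 with
      | none => (some work, height)
      | some bt => if work ≤ bt then (some work, height) else st)
    ((none : Option Int), (0 : Int))
  ((sel.1).getD 0, sel.2)

-- ===== PRECONDITION & SPEC =====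
def Spec_brute_force_for_min_work_time (lands : List (List Int)) (B : Int) (out : Int × Int) : Prop := out = brute_force_for_min_work_time_alt lands B
instance (lands : List (List Int)) (B : Int) (out : Int × Int) : Decidable (Spec_brute_force_for_min_work_time lands B out) := by unfold Spec_brute_force_for_min_work_time; infer_instance

-- ===== CLAIM (what is proved, stated in full; the proofs are below) =====
def Claim_equal_brute_force_for_min_work_time : Prop := ∀ (lands : List (List Int)) (B : Int), Dom_brute_force_for_min_work_time lands B → Spec_brute_force_for_min_work_time lands B (brute_force_for_min_work_time lands B)

-- ===== LEMMAS AND PROOFS =====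

-- canonical per-height cost: per-block cost and the guarded total
def pvF (h v : Int) : Int := if v ≥ h then (v - h) * 2 else h - v

def pvW (lands : List (List Int)) (B h : Int) : Int :=
  if B + (lands.flatten.sum - (lands.flatten.length : Int) * h) < 0 then 500 * 500 * 256 * 2
  else (lands.flatten.map (pvF h)).sum

lemma pv_sum_sub_const (xs : List Int) (c : Int) :
    (xs.map (fun v => v - c)).sum = xs.sum - (xs.length : Int) * c := by
  induction xs with
  | nil => simp
  | cons a t ih => simp [ih]; ring

-- A's helper equals the canonical cost
lemma pvA_state (lands : List (List Int)) (flat B : Int) :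
    (lands.foldl (fun st line =>
      line.foldl (fun st block =>
        if block ≥ flat then (st.1 + (block - flat), st.2 + (block - flat) * 2)
        else if block < flat then (st.1 - (flat - block), st.2 + (flat - block))
        else st) st) (B, (0 : Int)))
    = (B + (lands.flatten.map (fun v => v - flat)).sum, (lands.flatten.map (pvF flat)).sum) := by
  rw [← List.foldl_flatten]
  have hstep : (fun (st : Int × Int) block =>
        if block ≥ flat then (st.1 + (block - flat), st.2 + (block - flat) * 2)
        else if block < flat then (st.1 - (flat - block), st.2 + (flat - block))
        else st)
      = fun st e => (st.1 + (e - flat), st.2 + pvF flat e) := by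
    funext st e
    simp only [pvF]
    split_ifs with h1 h2
    · rfl
    · exact Prod.ext (by omega) rfl
    · exact Prod.ext (by omega) (by exfalso; omega)
  rw [hstep, PySem.List.foldl_prod_mk (f := fun a e => a + (e - flat)) (g := fun w e => w + pvF flat e),
      PySem.List.foldl_add (g := fun e => e - flat), PySem.List.foldl_add (g := fun e => pvF flat e)]
  simp

lemma pvA_helper_eq (lands : List (List Int)) (flat B : Int) :
    dig_then_put_for_height_with_blocks lands flat B = pvW lands B flat := by
  unfold dig_then_put_for_height_with_blocks pvW
  rw [pvA_state, pv_sum_sub_const]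

-- B's scan builds Counter(blocks), sum(blocks), len(blocks)
lemma pvB_scan_eq (lands : List (List Int)) :
    pvAltScan lands = (PySem.Dict.counter lands.flatten, lands.flatten.sum, (lands.flatten.length : Int)) := by
  unfold pvAltScan
  rw [← List.foldl_flatten]
  rw [PySem.List.foldl_prod_mk (f := fun (d : PySem.Dict Int Int) e => d.insert e (d.getD e 0 + 1))
      (g := fun (p : Int × Int) e => (p.1 + e, p.2 + 1))]
  rw [PySem.List.foldl_prod_mk (f := fun a e => a + e) (g := fun c (_ : Int) => c + 1)]
  rw [PySem.Dict.foldl_insert_getD_add_one_eq_counter]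
  rw [PySem.List.foldl_add (g := fun e => e), PySem.List.foldl_add (g := fun _ => (1:Int))]
  simp [Function.comp_def]

-- summing over the counter's items equals summing over all blocks
lemma pv_count_sum (xs : List Int) (φ : Int → Int) :
    ((PySem.Set.ofList xs).map (fun k => (xs.count k : Int) * φ k)).sum = (xs.map φ).sum := by
  rw [← List.sum_toFinset _ (PySem.Set.nodup_ofList xs)]
  have h1 : (xs.map φ).sum = ((xs : Multiset Int).map φ).sum := rfl
  rw [h1, Finset.sum_multiset_map_count]
  have h2 : (PySem.Set.ofList xs).toFinset = (xs : Multiset Int).toFinset := by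
    ext a; simp [List.mem_toFinset, PySem.Set.mem_ofList]
  rw [h2]
  refine Finset.sum_congr rfl (fun x _ => ?_)
  rw [Multiset.coe_count]; ring

-- B's per-height cost from the histogram equals the canonical cost
lemma pvB_work_eq (xs : List Int) (h : Int) :
    (PySem.Dict.counter xs).items.foldl (fun w vc =>
        if vc.1 ≥ h then w + 2 * vc.2 * (vc.1 - h) else w + vc.2 * (h - vc.1)) 0
      = (xs.map (pvF h)).sum := by
  rw [PySem.Dict.items_counter, List.foldl_map]
  rw [show (fun (w : Int) (x : Int) => (fun (w : Int) (vc : Int × Int) =>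
        if vc.1 ≥ h then w + 2 * vc.2 * (vc.1 - h) else w + vc.2 * (h - vc.1)) w ((fun k => (k, (xs.count k : Int))) x))
      = fun w k => w + (xs.count k : Int) * pvF h k from by
    funext w k
    simp only [pvF]
    split_ifs <;> ring]
  rw [PySem.List.foldl_add (g := fun k => (xs.count k : Int) * pvF h k)]
  rw [pv_count_sum]
  simp

-- A's assignment loop into [0]*n is the map over the range
lemma pv_setfold (f : Int → Int) (n : Nat) (tail : List Int) :
    (PySem.List.pyRange 0 (n : Int)).foldl
        (fun wt h => PySem.List.pySetD wt h (f h)) (List.replicate n 0 ++ tail)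
      = (PySem.List.pyRange 0 (n : Int)).map f ++ tail := by
  induction n generalizing tail with
  | zero => simp
  | succ n ih =>
    have hcast : (((n+1 : Nat)) : Int) = (n : Int) + 1 := by push_cast; ring
    rw [hcast, PySem.List.pyRange_one_succ_right (by positivity)]
    rw [List.foldl_append, List.map_append]
    have hrep : List.replicate (n+1) (0:Int) ++ tail = List.replicate n 0 ++ ((0:Int) :: tail) := by
      rw [List.replicate_succ']; simp
    rw [hrep, ih]
    simp only [List.foldl_cons, List.foldl_nil]
    rw [PySem.List.pySetD_natCast]
    have hlen : ((PySem.List.pyRange 0 (n : Int)).map f).length = n := by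
      rw [PySem.List.pyRange_zero_natCast]; simp
    rw [← hlen]
    simp

-- B's selection step
def pvSelStep (W : Int → Int) (st : Option Int × Int) (h : Int) : Option Int × Int :=
  match st.1 with
  | none => (some (W h), h)
  | some bt => if W h ≤ bt then (some (W h), h) else st

-- the running best/last-argmax fold computes the minimum and the last index attaining it
lemma pv_sel_spec (W : Int → Int) (hs : List Int) (hne : hs ≠ []) :
    ∃ m a, hs.foldl (pvSelStep W) (none, 0) = (some m, a)
      ∧ (∀ h ∈ hs, m ≤ W h) ∧ (∃ h ∈ hs, W h = m)
      ∧ (hs.filter (fun h => decide (m = W h))).getLast? = some a := by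
  induction hs using List.reverseRecOn with
  | nil => exact absurd rfl hne
  | append_singleton hs h ih =>
    rw [List.foldl_append, List.foldl_cons, List.foldl_nil]
    by_cases hn : hs = []
    · subst hn
      refine ⟨W h, h, rfl, ?_, ⟨h, by simp, rfl⟩, ?_⟩
      · intro x hx; simp at hx; simp [hx]
      · simp
    · obtain ⟨m, a, hfold, hmin, hatt, hlast⟩ := ih hn
      rw [hfold]
      by_cases hle : W h ≤ m
      · refine ⟨W h, h, ?_, ?_, ⟨h, by simp, rfl⟩, ?_⟩
        · simp [pvSelStep, hle]
        · intro x hx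
          rcases List.mem_append.mp hx with hx | hx
          · exact le_trans hle (hmin x hx)
          · simp at hx; simp [hx]
        · rw [List.filter_append]
          have : List.filter (fun x => decide (W h = W x)) [h] = [h] := by simp
          rw [this, List.getLast?_concat]
      · refine ⟨m, a, ?_, ?_, ?_, ?_⟩
        · simp [pvSelStep, hle]
        · intro x hx
          rcases List.mem_append.mp hx with hx | hx
          · exact hmin x hx
          · simp at hx; subst hx; omega
        · obtain ⟨x, hx, hwx⟩ := hatt; exact ⟨x, List.mem_append_left _ hx, hwx⟩
        · rw [List.filter_append]
          have : List.filter (fun x => decide (m = W x)) [h] = [] := by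
            simp; omega
          rw [this, List.append_nil, hlast]

-- min() returns the value every element is ≥ and some element attains
lemma pv_min_char (W : Int → Int) (hs : List Int) (m : Int)
    (hmin : ∀ h ∈ hs, m ≤ W h) (hatt : ∃ h ∈ hs, W h = m) :
    (PySem.List.min? (hs.map W) (fun x => x)).getD 0 = m := by
  obtain ⟨h0, hh0, hw0⟩ := hatt
  cases hmq : PySem.List.min? (hs.map W) (fun x => x) with
  | none =>
    rw [PySem.List.min?_eq_none_iff] at hmq
    simp at hmq
    exact absurd hh0 (by simp [hmq])
  | some m0 =>
    have hmem := PySem.List.min?_mem hmq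
    have hismin := PySem.List.min?_isMin hmq
    obtain ⟨x, hx, hwx⟩ := List.mem_map.mp hmem
    have h1 : m ≤ m0 := hwx ▸ hmin x hx
    have h2 : m0 ≤ m := by
      have := hismin (W h0) (List.mem_map.mpr ⟨h0, hh0, rfl⟩)
      simpa [hw0] using this
    simp; omega

-- ===== VERDICT (by name: the statement is the Claim_ definition above) =====
theorem brute_force_for_min_work_time_spec : Claim_equal_brute_force_for_min_work_time := by
  intro lands B _
  unfold Spec_brute_force_for_min_work_time
  have hrange_ne : (PySem.List.pyRange 0 (257:Int)) ≠ [] :=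
    List.ne_nil_of_mem (PySem.List.mem_pyRange_one.mpr ⟨le_refl 0, by norm_num⟩)
  obtain ⟨m, a, hfold, hmin, hatt, hlast⟩ := pv_sel_spec (pvW lands B) _ hrange_ne
  have hA : brute_force_for_min_work_time lands B = (m, a) := by
    simp only [brute_force_for_min_work_time]
    rw [show ((256:Int) + 1) = ((257:Nat):Int) from by norm_num]
    rw [show (((257:Nat):Int)).toNat = 257 from by simp]
    rw [← List.append_nil (List.replicate 257 (0:Int)),
        pv_setfold (fun h => dig_then_put_for_height_with_blocks lands h B) 257 [],
        List.append_nil]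
    rw [show (fun h => dig_then_put_for_height_with_blocks lands h B) = pvW lands B from
      funext fun h => pvA_helper_eq lands h B]
    rw [show (((257:Nat):Int)) = (257:Int) from by norm_num]
    rw [pv_min_char (pvW lands B) (PySem.List.pyRange 0 (257:Int)) m hmin hatt]
    have hcong : (PySem.List.pyRange 0 (257:Int)).foldl
        (fun acc height => if m = PySem.List.pyGetD ((PySem.List.pyRange 0 (257:Int)).map (pvW lands B)) height 0 then acc ++ [height] else acc) []
        = (PySem.List.pyRange 0 (257:Int)).foldl
        (fun acc height => if m = pvW lands B height then acc ++ [height] else acc) [] := by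
      apply PySem.List.foldl_congr_mem'
      intro x hx acc
      have hx' := PySem.List.mem_pyRange_one.mp hx
      rw [PySem.List.pyGetD_map_pyRange_of_nonneg (pvW lands B) 257 x 0 hx'.1 hx'.2]
    rw [hcong, PySem.List.foldl_append_ite_eq_filter (p := fun h => m = pvW lands B h)]
    rw [List.nil_append, PySem.List.pyGet?_neg_one, hlast]
    rfl
  have hB : brute_force_for_min_work_time_alt lands B = (m, a) := by
    simp only [brute_force_for_min_work_time_alt]
    rw [pvB_scan_eq]
    have hw : ∀ height : Int,
        (if B + (PySem.Dict.counter lands.flatten, lands.flatten.sum, (lands.flatten.length : Int)).2.1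
              - (PySem.Dict.counter lands.flatten, lands.flatten.sum, (lands.flatten.length : Int)).2.2 * height < 0
          then (500 * 500 * 256 * 2 : Int)
          else (PySem.Dict.counter lands.flatten, lands.flatten.sum, (lands.flatten.length : Int)).1.items.foldl
            (fun w vc => if vc.1 ≥ height then w + 2 * vc.2 * (vc.1 - height) else w + vc.2 * (height - vc.1)) 0)
        = pvW lands B height := by
      intro height
      show (if B + lands.flatten.sum - (lands.flatten.length : Int) * height < 0
          then (500 * 500 * 256 * 2 : Int)
          else (PySem.Dict.counter lands.flatten).items.foldl
            (fun w vc => if vc.1 ≥ height then w + 2 * vc.2 * (vc.1 - height) else w + vc.2 * (height - vc.1)) 0)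
        = pvW lands B height
      rw [pvB_work_eq lands.flatten height]
      unfold pvW
      rw [show B + lands.flatten.sum - (lands.flatten.length : Int) * height
          = B + (lands.flatten.sum - (lands.flatten.length : Int) * height) from by ring]
    have hstep : (fun (st : Option Int × Int) (height : Int) =>
        match st.1 with
        | none => (some ((fun h => pvW lands B h) height), height)
        | some bt => if (fun h => pvW lands B h) height ≤ bt then (some ((fun h => pvW lands B h) height), height) else st)
        = pvSelStep (pvW lands B) := rfl
    simp only [hw]
    rw [hstep, hfold]
    rfl
  rw [hA, hB]
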